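-- pv_equiv track=rewrite | github.com/santosh653/interproscan | core/jms-implementation/support-mini-x86-32/bin/panther/panther_refined_score.py | get_match_groups
-- ===== SOURCE A (Python) =====
-- def get_match_groups(best_hits):
--     group_hits = {}
--     for el in best_hits:
--         hmm_id = el[0]
--         if hmm_id in group_hits:
--             el_hits = group_hits[hmm_id]
--             if el not in el_hits:
--                 el_hits.append(el)
--         else:
--             group_hits[hmm_id] = [el]
--     return group_hits
-- ===== SOURCE B (Python) =====
-- def get_match_groups(best_hits):
--     # pass 1: collect every hit per id, duplicates included, encounter order
--     group_hits = {}
--     for el in best_hits: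
--         group_hits.setdefault(el[0], []).append(el)
--     # pass 2: order-preserving dedup of each group ('in'-check: elements are lists)
--     cleaned = {}
--     for hmm_id, hits in group_hits.items():
--         deduped = []
--         for el in hits:
--             if el not in deduped:
--                 deduped.append(el)
--         cleaned[hmm_id] = deduped
--     return cleaned
-- ===== Notes on version B (the rewrite author's own statement) =====
-- stated objective: alternative
-- what changed: A dedups inline while grouping (membership test against the partial group inside the build loop); B first builds the full multiset of hits per id with setdefault, then dedups each group in a separate post-pass over the finished table.
import Mathlib
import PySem

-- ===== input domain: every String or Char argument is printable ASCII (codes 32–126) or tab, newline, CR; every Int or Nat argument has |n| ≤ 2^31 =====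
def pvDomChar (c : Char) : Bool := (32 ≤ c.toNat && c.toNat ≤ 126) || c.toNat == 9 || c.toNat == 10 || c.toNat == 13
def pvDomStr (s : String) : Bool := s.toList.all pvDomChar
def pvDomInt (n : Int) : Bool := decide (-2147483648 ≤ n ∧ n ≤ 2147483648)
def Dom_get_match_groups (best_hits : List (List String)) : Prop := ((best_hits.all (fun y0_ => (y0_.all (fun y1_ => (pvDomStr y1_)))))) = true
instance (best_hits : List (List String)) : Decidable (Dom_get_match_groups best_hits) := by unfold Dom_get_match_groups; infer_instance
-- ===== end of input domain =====

-- B builds each group's full hit list first and dedups it in a separate post-pass, instead of A's inline dedup while grouping.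


-- ===== PORT A =====
-- el[0]: exact via PySem.List.pyGet?; Pre_ excludes empty inner lists, where Python raises IndexError
def pvKey (el : List String) : String := (PySem.List.pyGet? el 0).getD ""

def pvStepA (gh : PySem.Dict String (List (List String))) (el : List String) :
    PySem.Dict String (List (List String)) :=
  match gh.get? (pvKey el) with
  | some el_hits => if el ∈ el_hits then gh else gh.insert (pvKey el) (el_hits ++ [el])
  | none => gh.insert (pvKey el) [el]

def get_match_groups (best_hits : List (List String)) : List (String × List (List String)) :=
  (best_hits.foldl pvStepA PySem.Dict.empty).items

-- ===== PORT B =====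
def pvDedup (hits : List (List String)) : List (List String) :=
  hits.foldl (fun acc el => if el ∈ acc then acc else acc ++ [el]) []

def get_match_groups_alt (best_hits : List (List String)) : List (String × List (List String)) :=
  -- pass 1: group_hits.setdefault(el[0], []).append(el); pass 2: dedup each group
  ((best_hits.foldl
      (fun d el => d.modify (pvKey el) [] (fun hits => hits ++ [el]))
      PySem.Dict.empty).items.map (fun p => (p.1, pvDedup p.2)))

-- ===== PRECONDITION & SPEC =====
-- Pre_ excludes inputs with an empty inner list, on which Python A raises IndexError at el[0].
def Pre_get_match_groups (best_hits : List (List String)) : Prop :=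
  ∀ el ∈ best_hits, el ≠ []
instance (best_hits : List (List String)) : Decidable (Pre_get_match_groups best_hits) := by unfold Pre_get_match_groups; infer_instance

def pvWitness_get_match_groups : List (List String) := [["a", "x"], ["a", "x"], ["b"], ["a", "y"]]

def Spec_get_match_groups (best_hits : List (List String)) (out : List (String × List (List String))) : Prop := out = get_match_groups_alt best_hits
instance (best_hits : List (List String)) (out : List (String × List (List String))) : Decidable (Spec_get_match_groups best_hits out) := by unfold Spec_get_match_groups; infer_instance

-- ===== CLAIM (what is proved, stated in full; the proofs are below) =====
def Claim_equal_get_match_groups : Prop := ∀ (best_hits : List (List String)), Dom_get_match_groups best_hits → Pre_get_match_groups best_hits → Spec_get_match_groups best_hits (get_match_groups best_hits)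

-- ===== LEMMAS AND PROOFS =====

-- one A-step at its own key behaves as one dedup-fold step
theorem pvStepA_getD_self (d : PySem.Dict String (List (List String))) (el : List String) :
    (pvStepA d el).getD (pvKey el) [] =
      (if el ∈ d.getD (pvKey el) [] then d.getD (pvKey el) [] else d.getD (pvKey el) [] ++ [el]) := by
  unfold pvStepA
  cases hg : d.get? (pvKey el) with
  | none =>
    rw [PySem.Dict.getD_of_get?_eq_none d [] hg]
    simp [PySem.Dict.getD_insert_self]
  | some v =>
    rw [PySem.Dict.getD_of_get?_eq_some d [] hg]
    by_cases hm : el ∈ v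
    · simp [hm, PySem.Dict.getD_of_get?_eq_some d [] hg]
    · simp [hm, PySem.Dict.getD_insert_self]

-- one A-step leaves every other key's group unchanged
theorem pvStepA_getD_ne (d : PySem.Dict String (List (List String))) (el : List String)
    (c : String) (h : pvKey el ≠ c) : (pvStepA d el).getD c [] = d.getD c [] := by
  unfold pvStepA
  cases hg : d.get? (pvKey el) with
  | none =>
    exact PySem.Dict.getD_insert_of_ne d _ _ (Ne.symm h)
  | some v =>
    by_cases hm : el ∈ v
    · simp [hm]
    · simp only [hm, if_false]
      exact PySem.Dict.getD_insert_of_ne d _ _ (Ne.symm h)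

-- one A-step adds (at most) its key to the key set
theorem pvStepA_keys (d : PySem.Dict String (List (List String))) (el : List String) :
    (pvStepA d el).keys = PySem.Set.add d.keys (pvKey el) := by
  unfold pvStepA
  cases hg : d.get? (pvKey el) with
  | none =>
    have hc : d.contains (pvKey el) = false := by
      rw [PySem.Dict.contains_eq_isSome_get?, hg]; rfl
    have hnm : pvKey el ∉ d.keys := by
      intro hmem
      rw [← PySem.Dict.contains_iff_mem_keys] at hmem
      simp [hc] at hmem
    rw [PySem.Dict.keys_insert_of_not_contains d _ hc]
    simp [PySem.Set.add, hnm]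
  | some v =>
    have hc : d.contains (pvKey el) = true := by
      rw [PySem.Dict.contains_eq_isSome_get?, hg]; rfl
    have hmem : pvKey el ∈ d.keys := by
      rw [← PySem.Dict.contains_iff_mem_keys]; exact hc
    by_cases hm : el ∈ v
    · simp [hm, PySem.Set.add, hmem]
    · simp only [hm, if_false]
      rw [PySem.Dict.keys_insert_of_contains d _ hc]
      simp [PySem.Set.add, hmem]

-- value of A's fold at any key c: a dedup-fold over the elements whose key is c
theorem pvA_getD (l : List (List String)) (d : PySem.Dict String (List (List String))) (c : String) :
    ((l.foldl pvStepA d).getD c []) =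
      (l.filter (fun el => pvKey el == c)).foldl
        (fun acc el => if el ∈ acc then acc else acc ++ [el]) (d.getD c []) := by
  induction l generalizing d with
  | nil => rfl
  | cons el t ih =>
    simp only [List.foldl_cons, List.filter_cons]
    by_cases hk : pvKey el = c
    · subst hk
      simp only [beq_self_eq_true, if_pos, List.foldl_cons]
      rw [ih, pvStepA_getD_self]
    · have hb : (pvKey el == c) = false := by simp [hk]
      simp only [hb, Bool.false_eq_true, if_neg, not_false_iff]
      rw [ih, pvStepA_getD_ne d el c hk]

-- keys of A's fold: the set-update of the start keys by the encountered keys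
theorem pvA_keys (l : List (List String)) (d : PySem.Dict String (List (List String))) :
    (l.foldl pvStepA d).keys = PySem.Set.update d.keys (l.map pvKey) := by
  induction l generalizing d with
  | nil => simp [PySem.Set.update]
  | cons el t ih =>
    simp only [List.foldl_cons, List.map_cons]
    rw [ih, PySem.Set.update_cons, pvStepA_keys]

-- ===== VERDICT (by name: the statement is the Claim_ definition above) =====
theorem get_match_groups_spec : Claim_equal_get_match_groups := by
  intro best_hits _ _
  unfold Spec_get_match_groups get_match_groups get_match_groups_alt
  set dA := best_hits.foldl pvStepA PySem.Dict.empty with hdA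
  set dB := best_hits.foldl
    (fun d el => d.modify (pvKey el) [] (fun hits => hits ++ [el])) PySem.Dict.empty with hdB
  have hkA : dA.keys = PySem.Set.ofList (best_hits.map pvKey) := by
    rw [hdA, pvA_keys]
    simp [PySem.Dict.keys_empty, PySem.Set.update_nil_left]
  have hkB : dB.keys = PySem.Set.ofList (best_hits.map pvKey) := by
    rw [hdB, PySem.Dict.keys_foldl_modify_key best_hits pvKey []
      (fun _ el => fun hits => hits ++ [el])]
    simp [PySem.Dict.keys_empty, PySem.Set.update_nil_left]
  have hndA : dA.keys.Nodup := by rw [hkA]; exact PySem.Set.nodup_ofList _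
  have hndB : dB.keys.Nodup := by rw [hkB]; exact PySem.Set.nodup_ofList _
  rw [PySem.Dict.items_eq_map_keys dA hndA [], PySem.Dict.items_eq_map_keys dB hndB []]
  rw [hkA, hkB, List.map_map]
  apply List.map_congr_left
  intro c _
  simp only [Function.comp]
  congr 1
  have hmap : List.foldl
      (fun (d : PySem.Dict String (List (List String))) (p : String × List String) =>
        d.modify p.1 [] (fun x => x ++ [p.2]))
      PySem.Dict.empty (best_hits.map (fun el => (pvKey el, el))) = dB := by
    rw [hdB, List.foldl_map]
  have hB : dB.getD c [] = best_hits.filter (fun el => pvKey el == c) := by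
    rw [← hmap, PySem.Dict.getD_foldl_modify_append]
    simp [PySem.Dict.getD_empty, List.filter_map, Function.comp_def]
  rw [hB, hdA, pvA_getD]
  simp [PySem.Dict.getD_empty, pvDedup]
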